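-- pv_equiv track=rewrite | github.com/gianniskmbls/Hello-World | python/interval.py | maxminIntervals
-- ===== SOURCE A (Python) =====
-- def maxminIntervals(spaces):
--     # Initialize variables to keep track of the maximum and minimum intervals.
--     max_interval = None
--     min_interval = None
--
--     # Initialize variables to keep track of the maximum and minimum interval lengths.
--     max_length = float('-inf')  # Initialize to negative infinity
--     min_length = float('inf')   # Initialize to positive infinity
--
--     # Iterate through each space in the list of spaces.
--     for space in spaces:
--         # Calculate the length of the current space.
--         space_length = space[1] - space[0]
--
--         # Check if the current space has a longer length than the current maximum.
--         if space_length > max_length: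
--             max_length = space_length
--             max_interval = space
--
--         # Check if the current space has a shorter length than the current minimum.
--         if space_length < min_length:
--             min_length = space_length
--             min_interval = space
--
--     # Return the maximum and minimum intervals.
--     return {"max": max_interval, "min": min_interval}
-- ===== SOURCE B (Python) =====
-- def maxminIntervals(spaces):
--     if not spaces:
--         return {"max": None, "min": None}
--     length = lambda s: s[1] - s[0]
--     return {"max": max(spaces, key=length), "min": min(spaces, key=length)}
-- ===== Notes on version B (the rewrite author's own statement) =====
-- stated objective: simpler
-- what changed: Replaced the hand-rolled running-extrema loop with float('inf') sentinels by two built-in key-based reductions (max/min with key) plus an explicit empty-list case.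
import Mathlib
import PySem

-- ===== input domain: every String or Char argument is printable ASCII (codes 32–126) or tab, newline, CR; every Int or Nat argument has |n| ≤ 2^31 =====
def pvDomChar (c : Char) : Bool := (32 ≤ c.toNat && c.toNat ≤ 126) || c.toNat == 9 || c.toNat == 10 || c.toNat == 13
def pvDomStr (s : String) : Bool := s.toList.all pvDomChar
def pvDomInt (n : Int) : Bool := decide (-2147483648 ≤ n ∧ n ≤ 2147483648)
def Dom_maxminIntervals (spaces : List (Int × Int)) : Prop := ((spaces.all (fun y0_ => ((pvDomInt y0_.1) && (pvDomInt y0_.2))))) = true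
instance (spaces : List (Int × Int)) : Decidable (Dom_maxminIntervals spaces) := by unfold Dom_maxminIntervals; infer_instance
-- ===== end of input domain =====

-- B replaces A's hand-rolled running-extrema loop (with ±inf sentinels) by two
-- built-in key-based reductions max/min with key=length, plus an explicit empty case (objective: simpler).


-- ===== PORT A =====
-- state: ((max_length, max_interval), (min_length, min_interval));
-- Python's float('-inf') / float('inf') sentinels are modelled by Option Int = none
-- (exact: 'space_length > -inf' and 'space_length < inf' are always true, matching the none branch).
def stepA (st : (Option Int × Option (Int × Int)) × (Option Int × Option (Int × Int)))
    (sp : Int × Int) : (Option Int × Option (Int × Int)) × (Option Int × Option (Int × Int)) :=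
  let l := sp.2 - sp.1
  let mx := match st.1.1 with
    | none => (some l, some sp)
    | some m => if m < l then (some l, some sp) else st.1
  let mn := match st.2.1 with
    | none => (some l, some sp)
    | some m => if l < m then (some l, some sp) else st.2
  (mx, mn)

def maxminIntervals (spaces : List (Int × Int)) : List (String × Option (Int × Int)) :=
  let st := spaces.foldl stepA ((none, none), (none, none))
  [("max", st.1.2), ("min", st.2.2)]

-- ===== PORT B =====
def maxminIntervals_alt (spaces : List (Int × Int)) : List (String × Option (Int × Int)) :=
  if spaces = [] then [("max", none), ("min", none)]
  else
    [("max", PySem.List.max? spaces (fun s => s.2 - s.1)),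
     ("min", PySem.List.min? spaces (fun s => s.2 - s.1))]

-- ===== PRECONDITION & SPEC =====
def Spec_maxminIntervals (spaces : List (Int × Int)) (out : List (String × Option (Int × Int))) : Prop := out = maxminIntervals_alt spaces
instance (spaces : List (Int × Int)) (out : List (String × Option (Int × Int))) : Decidable (Spec_maxminIntervals spaces out) := by unfold Spec_maxminIntervals; infer_instance

-- ===== CLAIM (what is proved, stated in full; the proofs are below) =====
def Claim_equal_maxminIntervals : Prop := ∀ (spaces : List (Int × Int)), Dom_maxminIntervals spaces → Spec_maxminIntervals spaces (maxminIntervals spaces)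

-- ===== LEMMAS AND PROOFS =====
-- the single-step accumulators of PySem.List.max? / min? with key = length
def kLen (sp : Int × Int) : Int := sp.2 - sp.1

def maxStep (acc : Option (Int × Int)) (x : Int × Int) : Option (Int × Int) :=
  match acc with
  | none => some x
  | some m => if kLen m < kLen x then some x else some m

def minStep (acc : Option (Int × Int)) (x : Int × Int) : Option (Int × Int) :=
  match acc with
  | none => some x
  | some m => if kLen x < kLen m then some x else some m

-- A's fold keeps exactly (length of current extremum, current extremum) on both sides
lemma foldA_invariant (xs : List (Int × Int)) :
    ∀ (a b : Option (Int × Int)),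
      xs.foldl stepA ((a.map kLen, a), (b.map kLen, b))
        = ((Option.map kLen (xs.foldl maxStep a), xs.foldl maxStep a),
           (Option.map kLen (xs.foldl minStep b), xs.foldl minStep b)) := by
  induction xs with
  | nil => intro a b; rfl
  | cons x xs ih =>
    intro a b
    have hstep : stepA ((a.map kLen, a), (b.map kLen, b)) x
        = ((Option.map kLen (maxStep a x), maxStep a x),
           (Option.map kLen (minStep b x), minStep b x)) := by
      cases a <;> cases b <;>
        simp only [stepA, maxStep, minStep, Option.map, kLen] <;> split_ifs <;> rfl
    simp only [List.foldl_cons, hstep, ih]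

lemma max?_eq_foldl (xs : List (Int × Int)) :
    PySem.List.max? xs (fun s => s.2 - s.1) = xs.foldl maxStep none := by
  unfold PySem.List.max?
  congr 1
  funext acc x
  cases acc <;> simp [maxStep, kLen]

lemma min?_eq_foldl (xs : List (Int × Int)) :
    PySem.List.min? xs (fun s => s.2 - s.1) = xs.foldl minStep none := by
  unfold PySem.List.min?
  congr 1
  funext acc x
  cases acc <;> simp [minStep, kLen]

-- ===== VERDICT (by name: the statement is the Claim_ definition above) =====
theorem maxminIntervals_spec : Claim_equal_maxminIntervals := by
  intro spaces _
  unfold Spec_maxminIntervals maxminIntervals maxminIntervals_alt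
  cases spaces with
  | nil => rfl
  | cons x xs =>
    have h := foldA_invariant (x :: xs) none none
    simp only [Option.map_none] at h
    simp only [h, max?_eq_foldl, min?_eq_foldl, if_neg (List.cons_ne_nil x xs)]
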